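-- pv_equiv track=rewrite | github.com/xu415061248/learngit | d.py | sandaiyi
-- ===== SOURCE A (Python) =====
-- def sandaiyi(s,m):
--     L=[]
--     a=list(set(s))
--     b=0
--     for x in a:
--         if s.count(x)==m:#牌的数目
--             b+=1
--             L.append(x)
--     L.sort()
--     if len(L)>=1:
--         if len(a)>1 and b==(len(a)-b) and ord(L[-1])-ord(L[0])==(b-1):
--             return m*10+1
-- ===== SOURCE B (Python) =====
-- def sandaiyi(s, m):
--     # Sort the string once, then scan it linearly run by run: each run of equal
--     # characters is one distinct character with its multiplicity; the first and
--     # last run of length m give the min/max matching characters for free.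
--     t = sorted(s)
--     run_char = None
--     run_len = 0
--     distinct = 0
--     b = 0
--     lo = None
--     hi = None
--     for ch in t:
--         if ch == run_char:
--             run_len += 1
--         else:
--             if run_char is not None:
--                 distinct += 1
--                 if run_len == m:
--                     b += 1
--                     if lo is None:
--                         lo = run_char
--                     hi = run_char
--             run_char = ch
--             run_len = 1
--     if run_char is not None:
--         distinct += 1
--         if run_len == m:
--             b += 1
--             if lo is None:
--                 lo = run_char
--             hi = run_char
--     if b >= 1 and distinct > 1 and b == distinct - b and ord(hi) - ord(lo) == b - 1:
--         return m * 10 + 1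
--     return None
-- ===== Notes on version B (the rewrite author's own statement) =====
-- stated objective: alternative
-- what changed: B sorts the whole string once and scans it linearly run-by-run: run lengths replace A's per-character s.count calls over list(set(s)), and the first/last run of length m yield the extremal characters directly from scan order, so no character set, no per-char counting pass and no sorted list of matching characters is built.
import Mathlib
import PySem

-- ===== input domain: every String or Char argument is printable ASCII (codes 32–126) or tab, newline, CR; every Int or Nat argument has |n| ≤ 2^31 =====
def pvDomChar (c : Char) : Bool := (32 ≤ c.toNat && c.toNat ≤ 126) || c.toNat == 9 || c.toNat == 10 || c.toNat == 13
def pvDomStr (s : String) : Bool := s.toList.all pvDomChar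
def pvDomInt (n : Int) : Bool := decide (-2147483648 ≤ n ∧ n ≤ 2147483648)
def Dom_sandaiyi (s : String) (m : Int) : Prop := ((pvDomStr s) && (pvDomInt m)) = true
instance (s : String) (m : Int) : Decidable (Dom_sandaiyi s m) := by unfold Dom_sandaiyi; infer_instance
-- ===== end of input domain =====

-- B sorts the string once and scans it linearly run-by-run (run lengths replace A's
-- per-character s.count over list(set(s)); first/last matching run give the extremal
-- characters from scan order, no sort of a collected list); objective: alternative.

-- ===== PORT A =====
def sandaiyi (s : String) (m : Int) : Option Int :=
  let l := s.toList
  let a : PySem.Set Char := PySem.Set.ofList l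
  let p := a.foldl (fun (st : Int × List Char) x =>
      if (l.count x : Int) = m then (st.1 + 1, st.2 ++ [x]) else st) (0, [])
  let L := PySem.List.sorted p.2 (fun c => c) false
  if 1 ≤ L.length then
    if (a.length : Int) > 1 ∧ p.1 = (a.length : Int) - p.1 ∧
       (Option.map₂ (fun (cl c0 : Char) => (cl.toNat : Int) - (c0.toNat : Int))
          (PySem.List.pyGet? L (-1)) (PySem.List.pyGet? L 0)) = some (p.1 - 1)
    then some (m * 10 + 1) else none
  else none

-- ===== PORT B =====
-- the scan state: current run char (None before the first char), its length so far,
-- and the accumulated distinct / b / lo / hi of B's loop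
structure PvSt where
  rc : Option Char
  rl : Int
  d  : Int
  b  : Int
  lo : Option Char
  hi : Option Char
  deriving DecidableEq, Repr

-- the flush block B runs when a run ends (and once more after the loop)
def pvFlushQ (m : Int) (c : Char) (rl d b : Int) (lo hi : Option Char) :
    Int × Int × Option Char × Option Char :=
  if rl = m then (d + 1, b + 1, (if lo = none then some c else lo), some c)
  else (d + 1, b, lo, hi)

-- one iteration of B's for-loop
def pvStep (m : Int) (st : PvSt) (ch : Char) : PvSt :=
  if st.rc = some ch then { st with rl := st.rl + 1 }
  else
    match st.rc with
    | none => { rc := some ch, rl := 1, d := st.d, b := st.b, lo := st.lo, hi := st.hi }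
    | some c =>
        let q := pvFlushQ m c st.rl st.d st.b st.lo st.hi
        { rc := some ch, rl := 1, d := q.1, b := q.2.1, lo := q.2.2.1, hi := q.2.2.2 }

-- the final 'if run_char is not None' flush after the loop
def pvFin (m : Int) (st : PvSt) : Int × Int × Option Char × Option Char :=
  match st.rc with
  | none => (st.d, st.b, st.lo, st.hi)
  | some c => pvFlushQ m c st.rl st.d st.b st.lo st.hi

def sandaiyi_alt (s : String) (m : Int) : Option Int :=
  let t := PySem.List.sorted s.toList (fun c => c) false
  let q := pvFin m (t.foldl (pvStep m) ⟨none, 0, 0, 0, none, none⟩)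
  if 1 ≤ q.2.1 ∧ 1 < q.1 ∧ q.2.1 = q.1 - q.2.1 then
    match q.2.2.2, q.2.2.1 with
    | some hi, some lo =>
        if (hi.toNat : Int) - (lo.toNat : Int) = q.2.1 - 1 then some (m * 10 + 1) else none
    | _, _ => none
  else none

-- ===== PRECONDITION & SPEC =====
def Spec_sandaiyi (s : String) (m : Int) (out : Option Int) : Prop := out = sandaiyi_alt s m
instance (s : String) (m : Int) (out : Option Int) : Decidable (Spec_sandaiyi s m out) := by unfold Spec_sandaiyi; infer_instance

-- ===== CLAIM (what is proved, stated in full; the proofs are below) =====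
def Claim_equal_sandaiyi : Prop := ∀ (s : String) (m : Int), Dom_sandaiyi s m → Spec_sandaiyi s m (sandaiyi s m)

-- ===== LEMMAS AND PROOFS =====

-- ===== LEMMAS AND PROOFS =====
theorem pv_foldl_min (c : Char) (L : List Char) (h : ∀ x ∈ L, c ≤ x) : L.foldl min c = c := by
  induction L with
  | nil => rfl
  | cons x t ih =>
      have hx : min c x = c := min_eq_left (h x (by simp))
      simp only [List.foldl_cons, hx]
      exact ih (fun y hy => h y (by simp [hy]))

theorem pv_min?_cons_le (c : Char) (L : List Char) (h : ∀ x ∈ L, c ≤ x) :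
    (c :: L).min? = some c := by
  simp [List.min?, pv_foldl_min c L h]

theorem pv_max?_cons_le (c : Char) (L : List Char) (h : ∀ x ∈ L, c ≤ x) :
    (c :: L).max? = L.max?.or (some c) := by
  cases L with
  | nil => rfl
  | cons y t =>
      have hy : max c y = y := max_eq_right (h y (by simp))
      simp [List.max?, List.foldl_cons, hy]

theorem pv_min?_dup (c : Char) (L : List Char) : (c :: c :: L).min? = (c :: L).min? := by
  simp [List.min?, List.foldl_cons, min_self]

theorem pv_max?_dup (c : Char) (L : List Char) : (c :: c :: L).max? = (c :: L).max? := by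
  simp [List.max?, List.foldl_cons, max_self]

-- B's loop starting mid-run (current run char c, length so far rl), on a sorted
-- remainder t whose elements are all ≥ c: it flushes each complete run once, so it
-- adds one distinct / one match / the extremal chars per distinct character of c :: t.
theorem pv_scan_run (m : Int) (cnt : Char → Nat) :
    ∀ (t : List Char) (c : Char) (rl d b : Int) (lo hi : Option Char),
      t.Pairwise (· ≤ ·) →
      (∀ x ∈ t, c ≤ x) →
      rl + (t.count c : Int) = (cnt c : Int) →
      (∀ x ∈ t, x ≠ c → t.count x = cnt x) →
      pvFin m (t.foldl (pvStep m) ⟨some c, rl, d, b, lo, hi⟩)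
        = (d + ((insert c t.toFinset).card : Int),
           b + (((insert c t.toFinset).filter (fun x => (cnt x : Int) = m)).card : Int),
           lo.or (((c :: t).filter (fun x => decide ((cnt x : Int) = m))).min?),
           (((c :: t).filter (fun x => decide ((cnt x : Int) = m))).max?).or hi) := by
  intro t
  induction t with
  | nil =>
      intro c rl d b lo hi _ _ hcnt _
      have hc : (cnt c : Int) = rl := by simpa using hcnt.symm
      by_cases hm : rl = m
      · have hpc : ((cnt c : Int) = m) := by rw [hc]; exact hm
        cases lo <;>
          simp [pvFin, pvFlushQ, hm, hpc, Finset.filter_singleton, List.min?, List.max?, Option.or]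
      · have hpc : ¬((cnt c : Int) = m) := by rw [hc]; exact hm
        cases lo <;> simp [pvFin, pvFlushQ, hm, hpc, Finset.filter_singleton, Option.or]
  | cons x t' ih =>
      intro c rl d b lo hi hpw hge hcnt hfaith
      by_cases hx : x = c
      · subst hx
        have hstep : pvStep m ⟨some x, rl, d, b, lo, hi⟩ x = ⟨some x, rl + 1, d, b, lo, hi⟩ := by
          simp [pvStep]
        rw [List.foldl_cons, hstep]
        have hpw' : t'.Pairwise (· ≤ ·) := hpw.of_cons
        have hge' : ∀ y ∈ t', x ≤ y := fun y hy => List.rel_of_pairwise_cons hpw hy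
        have hcnt' : rl + 1 + (t'.count x : Int) = (cnt x : Int) := by
          have h := hcnt; simp [List.count_cons_self] at h; omega
        have hfaith' : ∀ y ∈ t', y ≠ x → t'.count y = cnt y := by
          intro y hy hne
          have h := hfaith y (by simp [hy]) hne
          simpa [List.count_cons, hne, Ne.symm hne] using h
        rw [ih x (rl + 1) d b lo hi hpw' hge' hcnt' hfaith']
        have hfs : insert x (x :: t').toFinset = insert x t'.toFinset := by simp
        rw [hfs]
        by_cases hpc : (cnt x : Int) = m
        · have hfc : (x :: t').filter (fun z => decide ((cnt z : Int) = m))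
              = x :: t'.filter (fun z => decide ((cnt z : Int) = m)) :=
            List.filter_cons_of_pos (by simp [hpc])
          have hfc2 : (x :: x :: t').filter (fun z => decide ((cnt z : Int) = m))
              = x :: x :: t'.filter (fun z => decide ((cnt z : Int) = m)) := by
            rw [List.filter_cons_of_pos (by simp [hpc]), hfc]
          rw [hfc, hfc2, pv_min?_dup, pv_max?_dup]
        · have hfc : (x :: t').filter (fun z => decide ((cnt z : Int) = m))
              = t'.filter (fun z => decide ((cnt z : Int) = m)) :=
            List.filter_cons_of_neg (by simp [hpc])
          have hfc2 : (x :: x :: t').filter (fun z => decide ((cnt z : Int) = m))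
              = t'.filter (fun z => decide ((cnt z : Int) = m)) := by
            rw [List.filter_cons_of_neg (by simp [hpc]), hfc]
          rw [hfc, hfc2]
      · -- x ≠ c : the run of c ends; B flushes and starts the run of x
        have hcx : c < x := lt_of_le_of_ne (hge x (by simp)) (fun h => hx h.symm)
        have hgt : ∀ y ∈ x :: t', c < y := by
          intro y hy
          rcases List.mem_cons.mp hy with rfl | hy'
          · exact hcx
          · exact lt_of_lt_of_le hcx (List.rel_of_pairwise_cons hpw hy')
        have hcnotin : c ∉ x :: t' := fun h => lt_irrefl c (hgt c h)
        have hcrl : rl = (cnt c : Int) := by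
          have h0 : (x :: t').count c = 0 := List.count_eq_zero.mpr hcnotin
          rw [h0] at hcnt; simpa using hcnt
        have hstep : pvStep m ⟨some c, rl, d, b, lo, hi⟩ x =
            ⟨some x, 1, (pvFlushQ m c rl d b lo hi).1, (pvFlushQ m c rl d b lo hi).2.1,
             (pvFlushQ m c rl d b lo hi).2.2.1, (pvFlushQ m c rl d b lo hi).2.2.2⟩ := by
          have hne : c ≠ x := fun h => hx h.symm
          simp [pvStep, hne]
        rw [List.foldl_cons, hstep]
        have hpw' : t'.Pairwise (· ≤ ·) := hpw.of_cons
        have hge' : ∀ y ∈ t', x ≤ y := fun y hy => List.rel_of_pairwise_cons hpw hy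
        have hcnt' : (1 : Int) + (t'.count x : Int) = (cnt x : Int) := by
          have h := hfaith x (by simp) hx
          have h2 : t'.count x + 1 = cnt x := by simpa [List.count_cons_self] using h
          omega
        have hfaith' : ∀ y ∈ t', y ≠ x → t'.count y = cnt y := by
          intro y hy hne
          have hyne : y ≠ c := fun h => by subst h; exact hcnotin (by simp [hy])
          have h := hfaith y (by simp [hy]) hyne
          simpa [List.count_cons, hne, Ne.symm hne] using h
        rw [ih x 1 _ _ _ _ hpw' hge' hcnt' hfaith']
        have hcnotin' : c ∉ (x :: t').toFinset := by simpa using hcnotin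
        have hxfs : (x :: t').toFinset = insert x t'.toFinset := by simp
        have hcard : ((insert c (x :: t').toFinset).card : Int)
            = 1 + ((insert x t'.toFinset).card : Int) := by
          rw [Finset.card_insert_of_notMem hcnotin', hxfs]
          push_cast; ring
        have hFle : ∀ y ∈ (x :: t').filter (fun z => decide ((cnt z : Int) = m)), c ≤ y :=
          fun y hy => (hgt y (List.mem_of_mem_filter hy)).le
        by_cases hpc : (cnt c : Int) = m
        · -- the flushed run matches
          have hfilt : (insert c (x :: t').toFinset).filter (fun z => (cnt z : Int) = m)
              = insert c (((x :: t').toFinset).filter (fun z => (cnt z : Int) = m)) := by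
            rw [Finset.filter_insert, if_pos hpc]
          have hcnotin'' : c ∉ ((x :: t').toFinset).filter (fun z => (cnt z : Int) = m) :=
            fun h => hcnotin' (Finset.mem_of_mem_filter _ h)
          have hbcard : (((insert c (x :: t').toFinset).filter (fun z => (cnt z : Int) = m)).card : Int)
              = 1 + ((((insert x t'.toFinset)).filter (fun z => (cnt z : Int) = m)).card : Int) := by
            rw [hfilt, Finset.card_insert_of_notMem hcnotin'', hxfs]
            push_cast; ring
          have hlfilt : (c :: x :: t').filter (fun z => decide ((cnt z : Int) = m))
              = c :: (x :: t').filter (fun z => decide ((cnt z : Int) = m)) := by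
            simp [List.filter_cons, hpc]
          have hq : pvFlushQ m c rl d b lo hi
              = (d + 1, b + 1, (if lo = none then some c else lo), some c) := by
            rw [pvFlushQ, if_pos (show rl = m by rw [hcrl]; exact hpc)]
          rw [hlfilt, pv_min?_cons_le c _ hFle, pv_max?_cons_le c _ hFle, hq, hbcard, hcard]
          simp only [Prod.mk.injEq]
          refine ⟨by ring, by ring, ?_, ?_⟩
          · cases lo <;> simp
          · cases ((x :: t').filter (fun z => decide ((cnt z : Int) = m))).max? <;> simp
        · -- the flushed run does not match
          have hfilt : (insert c (x :: t').toFinset).filter (fun z => (cnt z : Int) = m)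
              = ((x :: t').toFinset).filter (fun z => (cnt z : Int) = m) := by
            rw [Finset.filter_insert, if_neg hpc]
          have hlfilt : (c :: x :: t').filter (fun z => decide ((cnt z : Int) = m))
              = (x :: t').filter (fun z => decide ((cnt z : Int) = m)) := by
            simp [List.filter_cons, hpc]
          have hq : pvFlushQ m c rl d b lo hi = (d + 1, b, lo, hi) := by
            rw [pvFlushQ, if_neg (show ¬ rl = m by rw [hcrl]; exact hpc)]
          rw [hlfilt, hq, hfilt, hcard, hxfs]
          simp only [Prod.mk.injEq]
          constructor
          · ring
          · norm_num

-- B's full loop from the initial state, on the sorted string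
theorem pv_scan_fresh (m : Int) (cnt : Char → Nat) (t : List Char)
    (hpw : t.Pairwise (· ≤ ·)) (hfaith : ∀ x ∈ t, t.count x = cnt x) :
    pvFin m (t.foldl (pvStep m) ⟨none, 0, 0, 0, none, none⟩)
      = ((t.toFinset.card : Int),
         ((t.toFinset.filter (fun x => (cnt x : Int) = m)).card : Int),
         (t.filter (fun x => decide ((cnt x : Int) = m))).min?,
         (t.filter (fun x => decide ((cnt x : Int) = m))).max?) := by
  cases t with
  | nil => simp [pvFin]
  | cons x t' =>
      have hstep : pvStep m ⟨none, 0, 0, 0, none, none⟩ x = ⟨some x, 1, 0, 0, none, none⟩ := by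
        simp [pvStep]
      rw [List.foldl_cons, hstep]
      have hpw' : t'.Pairwise (· ≤ ·) := hpw.of_cons
      have hge' : ∀ y ∈ t', x ≤ y := fun y hy => List.rel_of_pairwise_cons hpw hy
      have hcnt' : (1 : Int) + (t'.count x : Int) = (cnt x : Int) := by
        have h := hfaith x (by simp)
        have h2 : t'.count x + 1 = cnt x := by simpa [List.count_cons_self] using h
        omega
      have hfaith' : ∀ y ∈ t', y ≠ x → t'.count y = cnt y := by
        intro y hy hne
        have h := hfaith y (by simp [hy])
        simpa [List.count_cons, hne, Ne.symm hne] using h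
      rw [pv_scan_run m cnt t' x 1 0 0 none none hpw' hge' hcnt' hfaith']
      have hfs : insert x t'.toFinset = (x :: t').toFinset := by simp
      rw [hfs]
      simp

-- min?/max? only depend on the set of members
theorem pv_min?_congr (L1 L2 : List Char) (h : ∀ x, x ∈ L1 ↔ x ∈ L2) : L1.min? = L2.min? := by
  cases h1 : L1.min? with
  | none =>
      have h2 : L1 = [] := List.min?_eq_none_iff.mp h1
      have h3 : L2 = [] := List.eq_nil_iff_forall_not_mem.mpr
        (fun x hx => by simp [h2] at h; exact h x hx)
      rw [h3]; rfl
  | some v =>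
      obtain ⟨hv, hle⟩ := List.min?_eq_some_iff.mp h1
      exact (List.min?_eq_some_iff.mpr ⟨(h v).mp hv, fun z hz => hle z ((h z).mpr hz)⟩).symm

theorem pv_max?_congr (L1 L2 : List Char) (h : ∀ x, x ∈ L1 ↔ x ∈ L2) : L1.max? = L2.max? := by
  cases h1 : L1.max? with
  | none =>
      have h2 : L1 = [] := List.max?_eq_none_iff.mp h1
      have h3 : L2 = [] := List.eq_nil_iff_forall_not_mem.mpr
        (fun x hx => by simp [h2] at h; exact h x hx)
      rw [h3]; rfl
  | some v =>
      obtain ⟨hv, hle⟩ := List.max?_eq_some_iff.mp h1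
      exact (List.max?_eq_some_iff.mpr ⟨(h v).mp hv, fun z hz => hle z ((h z).mpr hz)⟩).symm

-- A's loop over the distinct chars: counts matches and collects them.
theorem pv_foldA (l : List Char) (m : Int) :
    ∀ (xs : List Char) (b0 : Int) (L0 : List Char),
      xs.foldl (fun (st : Int × List Char) x =>
        if (l.count x : Int) = m then (st.1 + 1, st.2 ++ [x]) else st) (b0, L0)
      = (b0 + (xs.countP (fun x => decide ((l.count x : Int) = m)) : Int),
         L0 ++ xs.filter (fun x => decide ((l.count x : Int) = m))) := by
  intro xs
  induction xs with
  | nil => intro b0 L0; simp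
  | cons x t ih =>
      intro b0 L0
      by_cases h : (l.count x : Int) = m
      · simp [List.foldl_cons, h, ih]
        omega
      · simp [List.foldl_cons, h, ih]

-- the head of sorted(xs) is min(xs)
theorem pv_head_sorted (xs : List Char) :
    (PySem.List.sorted xs (fun c => c) false).head? = xs.min? := by
  cases hL : PySem.List.sorted xs (fun c => c) false with
  | nil =>
      have hx : xs = [] := (PySem.List.sorted_eq_nil_iff (xs := xs) (key := fun c => c) (rev := false)).mp hL
      simp [hx]
  | cons y t =>
      have hperm : (PySem.List.sorted xs (fun c => c) false).Perm xs := PySem.List.sorted_perm ..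
      have hmem : y ∈ xs := hperm.mem_iff.mp (by simp [hL])
      have hle : ∀ z ∈ xs, y ≤ z := fun z hz => PySem.List.key_head_sorted_le _ _ hL z hz
      simp only [List.head?_cons]
      exact (List.min?_eq_some_iff.mpr ⟨hmem, hle⟩).symm

-- the last element of sorted(xs) is max(xs)
theorem pv_last_sorted (xs : List Char) :
    (PySem.List.sorted xs (fun c => c) false).getLast? = xs.max? := by
  rcases List.eq_nil_or_concat (PySem.List.sorted xs (fun c => c) false) with hL | ⟨t, z, hL⟩
  · have hx : xs = [] := (PySem.List.sorted_eq_nil_iff (xs := xs) (key := fun c => c) (rev := false)).mp hL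
    rw [hL, hx]
    rfl
  · rw [List.concat_eq_append] at hL
    have hperm : (PySem.List.sorted xs (fun c => c) false).Perm xs := PySem.List.sorted_perm ..
    have hpw : (PySem.List.sorted xs (fun c => c) false).Pairwise (fun a b => a ≤ b) :=
      PySem.List.sorted_pairwise ..
    rw [hL] at hperm hpw
    have hmem : z ∈ xs := hperm.mem_iff.mp (by simp)
    have hge : ∀ w ∈ xs, w ≤ z := by
      intro w hw
      rcases List.mem_append.mp (hperm.mem_iff.mpr hw) with h | h
      · exact (List.pairwise_append.mp hpw).2.2 w h z (by simp)
      · simp at h; simp [h]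
    rw [hL]
    simp only [List.getLast?_append, List.getLast?_singleton]
    exact (List.max?_eq_some_iff.mpr ⟨hmem, hge⟩).symm

-- the common final decision, in B's shape
def pvCanon (m k b : Int) (mn mx : Option Char) : Option Int :=
  if 1 ≤ b ∧ 1 < k ∧ b = k - b then
    match mx, mn with
    | some hi, some lo =>
        if (hi.toNat : Int) - (lo.toNat : Int) = b - 1 then some (m * 10 + 1) else none
    | _, _ => none
  else none

theorem pv_B_canon (s : String) (m : Int) :
    sandaiyi_alt s m
      = pvCanon m
          (((PySem.List.sorted s.toList (fun c => c) false).toFinset.card : Int))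
          ((((PySem.List.sorted s.toList (fun c => c) false).toFinset.filter
              (fun x => (s.toList.count x : Int) = m)).card : Int))
          (((PySem.List.sorted s.toList (fun c => c) false).filter
              (fun x => decide ((s.toList.count x : Int) = m))).min?)
          (((PySem.List.sorted s.toList (fun c => c) false).filter
              (fun x => decide ((s.toList.count x : Int) = m))).max?) := by
  have hpw : (PySem.List.sorted s.toList (fun c => c) false).Pairwise (· ≤ ·) := by
    have h := PySem.List.sorted_pairwise (xs := s.toList) (key := fun c => c)
    simpa using h
  have hperm : (PySem.List.sorted s.toList (fun c => c) false).Perm s.toList :=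
    PySem.List.sorted_perm ..
  have hfaith : ∀ x ∈ PySem.List.sorted s.toList (fun c => c) false,
      (PySem.List.sorted s.toList (fun c => c) false).count x = s.toList.count x :=
    fun x _ => hperm.count_eq x
  simp only [sandaiyi_alt, pvCanon,
    pv_scan_fresh m (fun x => s.toList.count x) _ hpw hfaith]

theorem pv_shape (mm k b u : Int) (n : Nat) (hn : (n : Int) = b) (hb : (1 : Int) ≤ b) :
    (if 1 ≤ n then
       (if k > 1 ∧ b = k - b ∧ (some u = some (b - 1)) then some (mm * 10 + 1) else none)
     else none)
    = if 1 ≤ b ∧ 1 < k ∧ b = k - b then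
        (if u = b - 1 then some (mm * 10 + 1) else none)
      else none := by
  have hn1 : 1 ≤ n := by omega
  rw [if_pos hn1]
  simp only [gt_iff_lt, Option.some.injEq]
  split_ifs with hA hB hC <;> first | rfl | tauto

theorem pv_A_canon (s : String) (m : Int) :
    sandaiyi s m
      = pvCanon m ((PySem.Set.ofList s.toList).length : Int)
          (((PySem.Set.ofList s.toList).countP
              (fun x => decide ((s.toList.count x : Int) = m)) : Nat) : Int)
          (((PySem.Set.ofList s.toList).filter
              (fun x => decide ((s.toList.count x : Int) = m))).min?)
          (((PySem.Set.ofList s.toList).filter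
              (fun x => decide ((s.toList.count x : Int) = m))).max?) := by
  simp only [sandaiyi]
  rw [pv_foldA]
  simp only [zero_add, List.nil_append]
  have hlen : (PySem.Set.ofList s.toList).countP (fun x => decide ((s.toList.count x : Int) = m))
      = ((PySem.Set.ofList s.toList).filter (fun x => decide ((s.toList.count x : Int) = m))).length :=
    List.countP_eq_length_filter
  cases hL : PySem.List.sorted
      ((PySem.Set.ofList s.toList).filter (fun x => decide ((s.toList.count x : Int) = m)))
      (fun c => c) false with
  | nil =>
      have hf : (PySem.Set.ofList s.toList).filter (fun x => decide ((s.toList.count x : Int) = m)) = [] :=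
        (PySem.List.sorted_eq_nil_iff ..).mp hL
      rw [hlen, hf]
      simp [pvCanon]
  | cons y tl =>
      have hlenL : (y :: tl).length
          = ((PySem.Set.ofList s.toList).filter (fun x => decide ((s.toList.count x : Int) = m))).length := by
        rw [← hL]; exact PySem.List.length_sorted ..
      have hble : (1 : Int) ≤ ((PySem.Set.ofList s.toList).countP
          (fun x => decide ((s.toList.count x : Int) = m)) : Int) := by
        rw [hlen, ← hlenL]; simp
      have hlast : (y :: tl).getLast?
          = ((PySem.Set.ofList s.toList).filter (fun x => decide ((s.toList.count x : Int) = m))).max? := by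
        rw [← hL]; exact pv_last_sorted _
      have hhead : ((PySem.Set.ofList s.toList).filter
          (fun x => decide ((s.toList.count x : Int) = m))).min? = some y := by
        rw [← pv_head_sorted, hL]; rfl
      cases hmx : ((PySem.Set.ofList s.toList).filter
          (fun x => decide ((s.toList.count x : Int) = m))).max? with
      | none =>
          rw [hmx] at hlast
          simp at hlast
      | some mxv =>
          rw [hmx] at hlast
          rw [hhead, hlen, ← hlenL]
          simp only [PySem.List.pyGet?_neg_one, hlast, PySem.List.pyGet?_zero_cons,
            Option.map₂, Option.bind_some, Option.map_some, pvCanon]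
          exact pv_shape m ((PySem.Set.ofList s.toList).length : Int) ((y :: tl).length : Int)
            ((mxv.toNat : Int) - (y.toNat : Int)) (y :: tl).length rfl (by simp)

theorem sandaiyi_spec_aux (s : String) (m : Int) : sandaiyi s m = sandaiyi_alt s m := by
  rw [pv_A_canon, pv_B_canon]
  have hperm : (PySem.List.sorted s.toList (fun c => c) false).Perm s.toList :=
    PySem.List.sorted_perm ..
  have hmem : ∀ x, x ∈ PySem.Set.ofList s.toList ↔
      x ∈ PySem.List.sorted s.toList (fun c => c) false :=
    fun x => (PySem.Set.mem_ofList s.toList x).trans hperm.mem_iff.symm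
  have hnd : (PySem.Set.ofList s.toList).Nodup := PySem.Set.nodup_ofList s.toList
  have hDT : (PySem.Set.ofList s.toList).toFinset
      = (PySem.List.sorted s.toList (fun c => c) false).toFinset := by
    ext z
    simp only [List.mem_toFinset]
    exact hmem z
  have hk : ((PySem.Set.ofList s.toList).length : Int)
      = (((PySem.List.sorted s.toList (fun c => c) false).toFinset.card : Nat) : Int) := by
    rw [← hDT, List.toFinset_card_of_nodup hnd]
  have hfn : ((PySem.Set.ofList s.toList).filter
      (fun x => decide ((s.toList.count x : Int) = m))).Nodup := hnd.filter _
  have hft : ((PySem.Set.ofList s.toList).filter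
        (fun x => decide ((s.toList.count x : Int) = m))).toFinset
      = (PySem.List.sorted s.toList (fun c => c) false).toFinset.filter
          (fun x => (s.toList.count x : Int) = m) := by
    ext z
    simp only [List.mem_toFinset, List.mem_filter, Finset.mem_filter, decide_eq_true_eq]
    exact and_congr (hmem z) Iff.rfl
  have hb : (((PySem.Set.ofList s.toList).countP
        (fun x => decide ((s.toList.count x : Int) = m)) : Nat) : Int)
      = ((((PySem.List.sorted s.toList (fun c => c) false).toFinset.filter
          (fun x => (s.toList.count x : Int) = m)).card : Nat) : Int) := by
    rw [← hft, List.toFinset_card_of_nodup hfn, ← List.countP_eq_length_filter]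
  have hmn : ((PySem.Set.ofList s.toList).filter
        (fun x => decide ((s.toList.count x : Int) = m))).min?
      = ((PySem.List.sorted s.toList (fun c => c) false).filter
          (fun x => decide ((s.toList.count x : Int) = m))).min? :=
    pv_min?_congr _ _ (fun z => by
      simp only [List.mem_filter]
      exact and_congr (hmem z) Iff.rfl)
  have hmx : ((PySem.Set.ofList s.toList).filter
        (fun x => decide ((s.toList.count x : Int) = m))).max?
      = ((PySem.List.sorted s.toList (fun c => c) false).filter
          (fun x => decide ((s.toList.count x : Int) = m))).max? :=
    pv_max?_congr _ _ (fun z => by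
      simp only [List.mem_filter]
      exact and_congr (hmem z) Iff.rfl)
  rw [hk, hb, hmn, hmx]

-- ===== VERDICT (by name: the statement is the Claim_ definition above) =====
theorem sandaiyi_spec : Claim_equal_sandaiyi := fun s m _ => sandaiyi_spec_aux s m
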